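-- pv_equiv track=rewrite | github.com/rorschach-xiao/leetcode | python/leetcode1023.py | camelMatch_simple
-- ===== SOURCE A (Python) =====
-- def camelMatch_simple(query, pattern):
--     i, j = 0, 0
--     if len(pattern) > len(query):
--         return False
--     while(i < len(query) and j < len(pattern)):
--         if query[i] == pattern[j]:
--             i += 1
--             j += 1
--         else:
--             if 'A'<= query[i] <= 'Z':
--                 return False
--             else:
--                 i += 1
--     if j < len(pattern):
--         return False
--
--     while(i < len(query)):
--         if 'A'<= query[i] <= 'Z':
--             return False
--         i += 1
--     return True
-- ===== SOURCE B (Python) =====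
-- def _uppers(s):
--     return [c for c in s if 'A' <= c <= 'Z']
--
-- def _is_subseq(p, q):
--     k = 0
--     for c in q:
--         if k < len(p) and p[k] == c:
--             k += 1
--     return k == len(p)
--
-- def camelMatch_simple(query, pattern):
--     return _is_subseq(pattern, query) and _uppers(query) == _uppers(pattern)
-- ===== Notes on version B (the rewrite author's own statement) =====
-- stated objective: alternative
-- what changed: A's single guarded greedy two-pointer scan (abort on any unmatched uppercase query char) is replaced by two independent linear checks: pattern is a subsequence of query (two-pointer helper) and the uppercase letters of query and pattern form the same sequence.
import Mathlib
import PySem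

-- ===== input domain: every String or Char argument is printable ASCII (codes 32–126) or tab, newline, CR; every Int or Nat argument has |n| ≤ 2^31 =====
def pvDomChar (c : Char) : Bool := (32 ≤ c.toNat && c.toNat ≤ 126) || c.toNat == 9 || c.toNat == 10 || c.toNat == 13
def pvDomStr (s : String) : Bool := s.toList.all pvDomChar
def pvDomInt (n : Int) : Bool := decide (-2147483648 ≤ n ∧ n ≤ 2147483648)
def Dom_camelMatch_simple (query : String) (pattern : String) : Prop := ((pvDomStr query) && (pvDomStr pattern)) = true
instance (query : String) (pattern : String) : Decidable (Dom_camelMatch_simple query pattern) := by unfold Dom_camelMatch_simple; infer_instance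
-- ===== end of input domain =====

-- B replaces A's single guarded greedy two-pointer scan by two independent checks
-- (pattern is a subsequence of query, and the uppercase letters of both agree in order);
-- objective: alternative decomposition, same cost.

-- ===== PORT A =====
-- A's second while loop: scan the rest of query for an uppercase letter
def pvLoop2 (q : List Char) (i : Nat) : Bool :=
  if h : i < q.length then
    if 'A' ≤ q[i] ∧ q[i] ≤ 'Z' then false else pvLoop2 q (i + 1)
  else true
termination_by q.length - i

-- A's first while loop, followed by the `j < len(pattern)` check and the second loop
def pvLoop1 (q p : List Char) (i j : Nat) : Bool :=
  if h : i < q.length ∧ j < p.length then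
    if q[i]'h.1 = p[j]'h.2 then pvLoop1 q p (i + 1) (j + 1)
    else if 'A' ≤ (q[i]'h.1) ∧ (q[i]'h.1) ≤ 'Z' then false
    else pvLoop1 q p (i + 1) j
  else if j < p.length then false
  else pvLoop2 q i
termination_by q.length - i
decreasing_by all_goals omega

def camelMatch_simple (query : String) (pattern : String) : Bool :=
  if pattern.toList.length > query.toList.length then false
  else pvLoop1 query.toList pattern.toList 0 0

-- ===== PORT B =====
-- _uppers(s)
def pvUppers (s : List Char) : List Char := s.filter (fun c => decide ('A' ≤ c) && decide (c ≤ 'Z'))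

-- _is_subseq(p, q): for-loop over q with pointer k into p, then `k == len(p)`
def pvIsSubseq (p q : List Char) : Bool :=
  (q.foldl (fun (k : Nat) c => if k < p.length ∧ p.getD k 'A' = c then k + 1 else k) 0) == p.length

def camelMatch_simple_alt (query : String) (pattern : String) : Bool :=
  pvIsSubseq pattern.toList query.toList && (pvUppers query.toList == pvUppers pattern.toList)

-- ===== PRECONDITION & SPEC =====
def Spec_camelMatch_simple (query : String) (pattern : String) (out : Bool) : Prop := out = camelMatch_simple_alt query pattern
instance (query : String) (pattern : String) (out : Bool) : Decidable (Spec_camelMatch_simple query pattern out) := by unfold Spec_camelMatch_simple; infer_instance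

-- ===== CLAIM (what is proved, stated in full; the proofs are below) =====
def Claim_equal_camelMatch_simple : Prop := ∀ (query : String) (pattern : String), Dom_camelMatch_simple query pattern → Spec_camelMatch_simple query pattern (camelMatch_simple query pattern)

-- ===== LEMMAS AND PROOFS =====

-- structural form of A's two loops (recursion on the remaining query)
def pvG : List Char → List Char → Bool
  | [], p => p.isEmpty
  | c :: q, [] => if 'A' ≤ c ∧ c ≤ 'Z' then false else pvG q []
  | c :: q, d :: p => if c = d then pvG q p
      else if 'A' ≤ c ∧ c ≤ 'Z' then false else pvG q (d :: p)

lemma pvLoop2_eq (q : List Char) (i : Nat) : pvLoop2 q i = pvG (q.drop i) [] := by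
  fun_induction pvLoop2 q i with
  | case1 i h hu => rw [List.drop_eq_getElem_cons h, pvG]; simp [hu]
  | case2 i h hu ih => rw [List.drop_eq_getElem_cons h, pvG]; simp [hu, ih]
  | case3 i h => rw [List.drop_eq_nil_iff.mpr (by omega)]; simp [pvG]

lemma pvLoop1_eq (q p : List Char) (i j : Nat) : pvLoop1 q p i j = pvG (q.drop i) (p.drop j) := by
  fun_induction pvLoop1 q p i j with
  | case1 i j h he ih =>
    rw [List.drop_eq_getElem_cons h.1, List.drop_eq_getElem_cons h.2, pvG]
    simp [he, ih]
  | case2 i j h he hu =>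
    rw [List.drop_eq_getElem_cons h.1, List.drop_eq_getElem_cons h.2, pvG]
    simp [he, hu]
  | case3 i j h he hu ih =>
    rw [List.drop_eq_getElem_cons h.1, List.drop_eq_getElem_cons h.2, pvG]
    rw [List.drop_eq_getElem_cons h.2] at ih
    simp [he, hu, ih]
  | case4 i j h hj =>
    have hi : ¬ i < q.length := by tauto
    rw [List.drop_eq_nil_iff.mpr (by omega), pvG.eq_def]
    rcases hp : p.drop j with _ | ⟨d, t⟩
    · exfalso; have := List.drop_eq_nil_iff.mp hp; omega
    · simp
  | case5 i j h hj =>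
    rw [show List.drop j p = [] from List.drop_eq_nil_iff.mpr (by omega), pvLoop2_eq]

lemma pvUppers_cons (c : Char) (s : List Char) :
    pvUppers (c :: s) = if 'A' ≤ c ∧ c ≤ 'Z' then c :: pvUppers s else pvUppers s := by
  simp only [pvUppers, List.filter_cons]
  split <;> split <;> simp_all

-- the greedy with the uppercase block succeeds iff the pattern is a subsequence of the
-- query and both sides list the same uppercase letters in the same order
lemma pvG_iff (q p : List Char) :
    pvG q p = true ↔ (p.Sublist q ∧ pvUppers q = pvUppers p) := by
  induction q generalizing p with
  | nil =>
    cases p with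
    | nil => simp [pvG, pvUppers]
    | cons d p => simp [pvG, pvUppers]
  | cons c q ih =>
    cases p with
    | nil =>
      rw [pvG, pvUppers_cons]
      by_cases hu : 'A' ≤ c ∧ c ≤ 'Z'
      · simp [hu, pvUppers]
      · simp [hu, ih, pvUppers]
    | cons d p =>
      by_cases he : c = d
      · subst he
        rw [pvG, if_pos rfl, ih]
        simp only [List.cons_sublist_cons, pvUppers_cons]
        split <;> simp
      · have hsub : (d :: p).Sublist (c :: q) ↔ (d :: p).Sublist q := by
          constructor
          · intro hs
            cases hs with
            | cons _ h => exact h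
            | cons₂ => exact absurd rfl he
          · intro h; exact h.cons _
        rw [pvG]
        simp only [if_neg he]
        by_cases hu : 'A' ≤ c ∧ c ≤ 'Z'
        · simp only [if_pos hu]
          constructor
          · intro h; exact absurd h (by simp)
          · rintro ⟨hs, hf⟩
            exfalso
            have hs' := hsub.mp hs
            have hfs : (pvUppers (d :: p)).Sublist (pvUppers q) := List.Sublist.filter _ hs'
            rw [pvUppers_cons, if_pos hu] at hf
            rw [← hf] at hfs
            have := hfs.length_le
            simp at this
        · rw [if_neg hu, ih, hsub, pvUppers_cons c q, if_neg hu]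

lemma pvFold_stuck (p q : List Char) :
    q.foldl (fun (k : Nat) c => if k < p.length ∧ p.getD k 'A' = c then k + 1 else k) p.length
      = p.length := by
  induction q with
  | nil => rfl
  | cons c q ih => rw [List.foldl_cons, if_neg (by simp)]; exact ih

lemma pvFold_iff (p q : List Char) (k : Nat) (hk : k ≤ p.length) :
    (q.foldl (fun (k : Nat) c => if k < p.length ∧ p.getD k 'A' = c then k + 1 else k) k
       = p.length) ↔ (p.drop k).Sublist q := by
  induction q generalizing k with
  | nil =>
    simp only [List.foldl_nil, List.sublist_nil, List.drop_eq_nil_iff]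
    omega
  | cons c q ih =>
    rw [List.foldl_cons]
    by_cases hlt : k < p.length
    · have hdrop : p.drop k = p[k] :: p.drop (k + 1) := List.drop_eq_getElem_cons hlt
      by_cases heq : p.getD k 'A' = c
      · have hgc : p[k] = c := by rwa [List.getD_eq_getElem _ _ hlt] at heq
        rw [if_pos ⟨hlt, heq⟩, ih _ (by omega), hdrop, hgc]
        exact (List.cons_sublist_cons).symm
      · have hgc : p[k] ≠ c := by rwa [List.getD_eq_getElem _ _ hlt] at heq
        rw [if_neg (by tauto), ih _ hk, hdrop]
        constructor
        · intro h; exact h.cons _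
        · intro h
          cases h with
          | cons _ h => exact h
          | cons₂ => exact absurd rfl hgc
    · have hk' : k = p.length := by omega
      subst hk'
      rw [if_neg (by simp), pvFold_stuck]
      simp [List.drop_eq_nil_iff.mpr (le_refl _)]

lemma pvIsSubseq_iff (p q : List Char) : pvIsSubseq p q = true ↔ p.Sublist q := by
  rw [pvIsSubseq, beq_iff_eq, pvFold_iff p q 0 (by omega), List.drop_zero]

lemma pv_main (q p : List Char) : (if p.length > q.length then false else pvLoop1 q p 0 0)
    = (pvIsSubseq p q && (pvUppers q == pvUppers p)) := by
  by_cases hlen : p.length > q.length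
  · rw [if_pos hlen]
    have hns : ¬ p.Sublist q := fun h => absurd h.length_le (by omega)
    have hsub : pvIsSubseq p q = false := by
      cases h : pvIsSubseq p q with
      | false => rfl
      | true => exact absurd ((pvIsSubseq_iff p q).mp h) hns
    simp [hsub]
  · rw [if_neg hlen, pvLoop1_eq, List.drop_zero, List.drop_zero]
    have hiff := pvG_iff q p
    cases h : pvG q p with
    | false =>
      rw [h] at hiff
      simp only [Bool.false_eq_true, false_iff] at hiff
      symm
      cases h1 : pvIsSubseq p q with
      | false => simp
      | true =>
        simp only [Bool.true_and, beq_eq_false_iff_ne, ne_eq]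
        intro hc
        exact hiff ⟨(pvIsSubseq_iff p q).mp h1, hc⟩
    | true =>
      rw [h] at hiff
      simp only [true_iff] at hiff
      rw [eq_comm, Bool.and_eq_true, beq_iff_eq]
      exact ⟨(pvIsSubseq_iff p q).mpr hiff.1, hiff.2⟩

-- ===== VERDICT (by name: the statement is the Claim_ definition above) =====
theorem camelMatch_simple_spec : Claim_equal_camelMatch_simple := by
  intro query pattern _
  unfold Spec_camelMatch_simple camelMatch_simple camelMatch_simple_alt
  exact pv_main query.toList pattern.toList
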